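-- pv_equiv track=rewrite | github.com/mmroch4/university | introduction-to-programming/tests/2024-2025/#2/4/index.py | sopranos_code
-- ===== SOURCE A (Python) =====
-- MOD = 26
--
-- def convert(letter: str) -> str:
--   if ord("A") <= ord(letter) <= ord("Z"):
--     n = (ord(letter) - ord("A") - 1) % MOD + ord("a")
--
--     return chr(n)
--   else:
--     n = (ord(letter) - ord("a") + 1) % MOD + ord("A")
--
--     return chr(n)
--
-- def sopranos_code(s: str) -> str:
--   r = []
--
--   for c in s:
--     if ord("a") <= ord(c) <= ord("z") or ord("A") <= ord(c) <= ord("Z"):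
--       r.append(convert(c))
--     else:
--       r.append(c)
--
--   return "".join(r)
-- ===== SOURCE B (Python) =====
-- UPPER = "ABCDEFGHIJKLMNOPQRSTUVWXYZ"
-- LOWER = "abcdefghijklmnopqrstuvwxyz"
--
-- def sopranos_code(s: str) -> str:
--     # The cipher is an involution made of 26 disjoint transpositions
--     # UPPER[i] <-> LOWER[(i-1) % 26]; apply each transposition to the whole
--     # string with a split/replace/join swap pass (no per-character branching).
--     for u, l in zip(UPPER, LOWER[-1:] + LOWER[:-1]):
--         s = l.join(piece.replace(l, u) for piece in s.split(u))
--     return s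
-- ===== Notes on version B (the rewrite author's own statement) =====
-- stated objective: alternative
-- what changed: B exploits that the cipher is an involution of 26 disjoint transpositions UPPER[i] <-> LOWER[(i-1)%26]: it loops over the alphabet, applying each transposition to the whole string with a split/replace/join swap pass, instead of A's single per-character scan with case arithmetic and branching.
import Mathlib
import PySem

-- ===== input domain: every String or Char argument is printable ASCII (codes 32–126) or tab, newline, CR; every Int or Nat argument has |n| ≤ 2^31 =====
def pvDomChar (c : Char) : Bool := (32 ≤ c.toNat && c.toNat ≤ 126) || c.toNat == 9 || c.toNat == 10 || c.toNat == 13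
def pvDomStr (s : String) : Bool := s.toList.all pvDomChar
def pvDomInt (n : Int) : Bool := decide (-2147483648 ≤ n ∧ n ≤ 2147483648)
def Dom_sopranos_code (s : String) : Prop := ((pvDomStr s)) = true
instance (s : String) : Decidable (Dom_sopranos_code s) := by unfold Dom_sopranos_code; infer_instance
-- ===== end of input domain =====

-- B replaces A's per-character case arithmetic by 26 alphabet-driven swap passes
-- (split/replace/join string surgery per transposition); alternative, not faster.

-- ===== PORT A =====
def pvConvert (letter : Char) : Char :=
  if 65 ≤ (letter.toNat : Int) ∧ (letter.toNat : Int) ≤ 90 then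
    Char.ofNat (PySem.Int.mod ((letter.toNat : Int) - 65 - 1) 26 + 97).toNat
  else
    Char.ofNat (PySem.Int.mod ((letter.toNat : Int) - 97 + 1) 26 + 65).toNat

def sopranos_code (s : String) : String :=
  String.mk (s.toList.foldl (fun r c =>
    if (97 ≤ (c.toNat : Int) ∧ (c.toNat : Int) ≤ 122) ∨ (65 ≤ (c.toNat : Int) ∧ (c.toNat : Int) ≤ 90)
    then r ++ [pvConvert c] else r ++ [c]) [])

-- ===== PORT B =====
def pvUpper : List Char := "ABCDEFGHIJKLMNOPQRSTUVWXYZ".toList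
def pvLower : List Char := "abcdefghijklmnopqrstuvwxyz".toList

-- one swap pass: s = l.join(piece.replace(l, u) for piece in s.split(u))
def pvSwapPass (t : List Char) (u l : Char) : List Char :=
  PySem.Chars.join [l] ((PySem.Chars.splitOn t [u]).map (fun p => PySem.Chars.replace p [l] [u]))

-- zip(UPPER, LOWER[-1:] + LOWER[:-1])
def pvPairs : List (Char × Char) :=
  pvUpper.zip (PySem.List.slice pvLower (some (-1)) none ++ PySem.List.slice pvLower none (some (-1)))

def sopranos_code_alt (s : String) : String :=
  String.mk (pvPairs.foldl (fun t ul => pvSwapPass t ul.1 ul.2) s.toList)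

-- ===== PRECONDITION & SPEC =====
def Spec_sopranos_code (s : String) (out : String) : Prop := out = sopranos_code_alt s
instance (s : String) (out : String) : Decidable (Spec_sopranos_code s out) := by unfold Spec_sopranos_code; infer_instance

-- ===== CLAIM (what is proved, stated in full; the proofs are below) =====
def Claim_equal_sopranos_code : Prop := ∀ (s : String), Dom_sopranos_code s → Spec_sopranos_code s (sopranos_code s)

-- ===== LEMMAS AND PROOFS =====

-- structural single-char split (proof-side spec of s.split(u))
def pvSplitOne (u : Char) : List Char → List (List Char)
  | [] => [[]]
  | c :: t => if c = u then [] :: pvSplitOne u t else (pvSplitOne u t).modifyHead (c :: ·)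

theorem pvSplitOne_ne_nil (u : Char) (l : List Char) : pvSplitOne u l ≠ [] := by
  cases l with
  | nil => simp [pvSplitOne]
  | cons c t =>
    simp only [pvSplitOne]
    split_ifs
    · simp
    · cases h : pvSplitOne u t with
      | nil => exact absurd h (pvSplitOne_ne_nil u t)
      | cons a r => simp

theorem pv_modifyHead_self {α : Type} (l : List α) : l.modifyHead (fun x => x) = l := by
  cases l <;> rfl

theorem pv_splitOn_go (u : Char) :
    ∀ (fuel : Nat) (l cur : List Char) (acc : List (List Char)), l.length < fuel →
    PySem.Chars.splitOn.go [u] fuel l cur acc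
      = acc.reverse ++ (pvSplitOne u l).modifyHead (cur.reverse ++ ·) := by
  intro fuel
  induction fuel with
  | zero => intro l cur acc h; omega
  | succ n ih =>
    intro l cur acc h
    cases l with
    | nil =>
      rw [PySem.Chars.splitOn.go]
      · simp [pvSplitOne]
      · omega
    | cons c t =>
      rw [PySem.Chars.splitOn.go]
      by_cases hc : c = u
      · have hp : [u].isPrefixOf (c :: t) = true := by simp [List.isPrefixOf, hc]
        simp only [hp, if_true, List.length_singleton, List.drop_succ_cons, List.drop_zero]
        rw [ih t [] (cur.reverse :: acc) (by simpa using Nat.lt_of_succ_lt_succ h)]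
        simp [pvSplitOne, hc, pv_modifyHead_self]
      · have hp : [u].isPrefixOf (c :: t) = false := by simp [List.isPrefixOf]; exact fun e => hc (by simpa using e.symm)
        simp only [hp, Bool.false_eq_true, if_false]
        rw [ih t (c :: cur) acc (by simpa using Nat.lt_of_succ_lt_succ h)]
        obtain ⟨a, r, hr⟩ : ∃ a r, pvSplitOne u t = a :: r := by
          cases hh : pvSplitOne u t with
          | nil => exact absurd hh (pvSplitOne_ne_nil u t)
          | cons a r => exact ⟨a, r, rfl⟩
        simp [pvSplitOne, hc, hr, List.modifyHead]

theorem pv_splitOn_single (u : Char) (l : List Char) :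
    PySem.Chars.splitOn l [u] = pvSplitOne u l := by
  have := pv_splitOn_go u (l.length + 1) l [] [] (by omega)
  simpa [PySem.Chars.splitOn, pv_modifyHead_self] using this

theorem pv_replace_go (l u : Char) :
    ∀ (fuel : Nat) (p acc : List Char), p.length ≤ fuel →
    PySem.Chars.replace.go [l] [u] fuel p acc
      = acc.reverse ++ p.map (fun c => if c = l then u else c) := by
  intro fuel
  induction fuel with
  | zero =>
    intro p acc h
    have : p = [] := List.length_eq_zero_iff.mp (Nat.le_zero.mp h)
    subst this
    rw [PySem.Chars.replace.go]; simp
  | succ n ih =>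
    intro p acc h
    cases p with
    | nil =>
      rw [PySem.Chars.replace.go]
      · simp
      · omega
    | cons c t =>
      rw [PySem.Chars.replace.go]
      by_cases hc : c = l
      · have hp : [l].isPrefixOf (c :: t) = true := by simp [List.isPrefixOf, hc]
        simp only [hp, if_true, List.length_singleton, List.drop_succ_cons, List.drop_zero]
        rw [ih t ([u].reverse ++ acc) (by simpa using Nat.le_of_succ_le_succ h)]
        simp [hc]
      · have hp : [l].isPrefixOf (c :: t) = false := by simp [List.isPrefixOf]; exact fun e => hc (by simpa using e.symm)
        simp only [hp, Bool.false_eq_true, if_false]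
        rw [ih t (c :: acc) (by simpa using Nat.le_of_succ_le_succ h)]
        simp [hc]

theorem pv_replace_single (l u : Char) (p : List Char) :
    PySem.Chars.replace p [l] [u] = p.map (fun c => if c = l then u else c) := by
  have := pv_replace_go l u p.length p [] (le_refl _)
  simpa [PySem.Chars.replace] using this

-- the transposition u ↔ l as a function
def pvSwapFun (u l c : Char) : Char := if c = u then l else if c = l then u else c

theorem pv_swapPass_eq_map (u l : Char) (t : List Char) :
    pvSwapPass t u l = t.map (pvSwapFun u l) := by
  unfold pvSwapPass
  rw [pv_splitOn_single]
  induction t with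
  | nil => simp [pvSplitOne, PySem.Chars.join_singleton, pv_replace_single]
  | cons c r ih =>
    obtain ⟨a, q, hr⟩ : ∃ a q, pvSplitOne u r = a :: q := by
      cases hh : pvSplitOne u r with
      | nil => exact absurd hh (pvSplitOne_ne_nil u r)
      | cons a q => exact ⟨a, q, rfl⟩
    rw [hr] at ih
    by_cases hc : c = u
    · rw [show pvSplitOne u (c :: r) = [] :: a :: q by simp [pvSplitOne, hc, hr]]
      rw [List.map_cons, List.map_cons, PySem.Chars.join_cons_cons]
      simp only [pv_replace_single, List.map_cons] at ih
      simp [pv_replace_single, pvSwapFun, hc, ih]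
    · rw [show pvSplitOne u (c :: r) = (c :: a) :: q by simp [pvSplitOne, hc, hr]]
      cases q with
      | nil =>
        simp only [List.map_cons, List.map_nil, PySem.Chars.join_singleton, pv_replace_single] at ih ⊢
        simp [pvSwapFun, hc, ih]
      | cons b q' =>
        simp only [List.map_cons, PySem.Chars.join_cons_cons, pv_replace_single] at ih ⊢
        simp [pvSwapFun, hc, ← ih]

-- a fold of whole-list map passes is a map of the folded per-char function
theorem pv_foldl_map (ps : List (Char × Char)) (cs : List Char) :
    ps.foldl (fun t ul => t.map (pvSwapFun ul.1 ul.2)) cs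
      = cs.map (fun c => ps.foldl (fun x ul => pvSwapFun ul.1 ul.2 x) c) := by
  induction ps generalizing cs with
  | nil => simp
  | cons p r ih => simp [List.foldl_cons, ih, Function.comp]

-- A loop body as a map
theorem pv_foldl_eq_map {P : Char → Prop} [DecidablePred P] (f : Char → Char)
    (l : List Char) (acc : List Char) :
    l.foldl (fun r c => if P c then r ++ [f c] else r ++ [c]) acc
    = acc ++ l.map (fun c => if P c then f c else c) := by
  induction l generalizing acc with
  | nil => simp
  | cons c t ih =>
    simp only [List.foldl_cons, List.map_cons, ih]
    by_cases h : P c <;> simp [h]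

-- per-character agreement of A's step with B's composed transpositions, for all chars in Dom
set_option maxRecDepth 16384 in
set_option maxHeartbeats 4000000 in
theorem pv_char_eq : ∀ n : Nat, n < 127 →
    (if (97 ≤ ((Char.ofNat n).toNat : Int) ∧ ((Char.ofNat n).toNat : Int) ≤ 122) ∨
        (65 ≤ ((Char.ofNat n).toNat : Int) ∧ ((Char.ofNat n).toNat : Int) ≤ 90)
     then pvConvert (Char.ofNat n) else Char.ofNat n)
      = pvPairs.foldl (fun x ul => pvSwapFun ul.1 ul.2 x) (Char.ofNat n) := by decide

-- ===== VERDICT (by name: the statement is the Claim_ definition above) =====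
set_option maxRecDepth 8192 in
set_option maxHeartbeats 1000000 in
theorem sopranos_code_spec : Claim_equal_sopranos_code := by
  intro s hdom
  unfold Spec_sopranos_code sopranos_code sopranos_code_alt
  rw [pv_foldl_eq_map pvConvert, List.nil_append]
  have hpass : pvPairs.foldl (fun t ul => pvSwapPass t ul.1 ul.2) s.toList
      = pvPairs.foldl (fun t ul => t.map (pvSwapFun ul.1 ul.2)) s.toList := by
    apply PySem.List.foldl_congr_mem
    intro acc ul hul
    exact pv_swapPass_eq_map ul.1 ul.2 acc
  rw [hpass, pv_foldl_map]
  refine congrArg String.mk ?_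
  apply List.map_congr_left
  intro c hc
  have hd : pvDomChar c = true := (List.all_eq_true.mp hdom) c hc
  have hlt : c.toNat < 127 := by simp [pvDomChar] at hd; omega
  have := pv_char_eq c.toNat hlt
  rwa [Char.ofNat_toNat] at this
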